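-- pv_equiv track=rewrite | github.com/1hubert/learning-python | #PyTest/matrix_problem_with_unit_tests/matrix.py | smallest_in_the_column
-- ===== SOURCE A (Python) =====
-- def smallest_in_the_column(m: list, col) -> tuple:
--     """Returns index of a smallest number in matrix in given column."""
--     smallest = m[0][col]
--     n = len(m)
--
--     for x in range(n):
--         if m[x][col] < smallest:
--             smallest = m[x][col]
--
--     for x in range(n):
--         if m[x][col] == smallest:
--             return (x, col)
-- ===== SOURCE B (Python) =====
-- def smallest_in_the_column(m: list, col) -> tuple:
--     """Returns index of a smallest number in matrix in given column."""
--     smallest = m[0][col]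
--     best = 0
--     for x in range(1, len(m)):
--         v = m[x][col]
--         if v < smallest:
--             smallest = v
--             best = x
--     return (best, col)
-- ===== Notes on version B (the rewrite author's own statement) =====
-- stated objective: simpler
-- what changed: B replaces A's two sequential scans (one to compute the minimum, one to re-scan for its first index) by a single pass that tracks the running minimum together with its first index.
import Mathlib
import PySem

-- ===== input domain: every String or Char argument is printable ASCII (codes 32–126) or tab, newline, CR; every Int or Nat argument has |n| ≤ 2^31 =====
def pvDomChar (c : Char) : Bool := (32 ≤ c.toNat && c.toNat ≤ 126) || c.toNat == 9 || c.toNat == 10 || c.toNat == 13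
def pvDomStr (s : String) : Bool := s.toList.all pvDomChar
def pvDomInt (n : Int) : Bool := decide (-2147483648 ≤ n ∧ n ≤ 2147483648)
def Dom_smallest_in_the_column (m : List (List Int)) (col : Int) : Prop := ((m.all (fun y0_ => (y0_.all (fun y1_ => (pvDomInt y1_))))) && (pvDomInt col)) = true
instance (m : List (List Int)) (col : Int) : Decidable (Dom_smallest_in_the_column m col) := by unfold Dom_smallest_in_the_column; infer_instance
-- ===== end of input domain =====

-- B fuses A's two sequential scans of the column (find min, then re-scan for its
-- first index) into one pass that tracks the running minimum with its first index.

-- m[x][col] (Python indexing, negative col from the end); default only reached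
-- outside Pre_, where Python raises IndexError.
def pvAt (m : List (List Int)) (x col : Int) : Int :=
  PySem.List.pyGetD (PySem.List.pyGetD m x []) col 0

-- ===== PORT A =====
-- A's second loop: 'for x in …: if m[x][col] == smallest: return (x, col)'.
-- The [] arm is Python's fall-through 'return None'; unreachable under Pre_.
def pvFindA (m : List (List Int)) (col smallest : Int) : List Int → Int × Int
  | [] => (0, col)
  | x :: rest =>
    if pvAt m x col == smallest then (x, col) else pvFindA m col smallest rest

def smallest_in_the_column (m : List (List Int)) (col : Int) : Int × Int :=
  let smallest0 := pvAt m 0 col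
  let n : Int := m.length
  let smallest := (PySem.List.pyRange 0 n 1).foldl
    (fun s x => if pvAt m x col < s then pvAt m x col else s) smallest0
  pvFindA m col smallest (PySem.List.pyRange 0 n 1)

-- ===== PORT B =====
def smallest_in_the_column_alt (m : List (List Int)) (col : Int) : Int × Int :=
  let sb := (PySem.List.pyRange 1 (m.length : Int) 1).foldl
    (fun (sb : Int × Int) x =>
      let v := pvAt m x col
      if v < sb.1 then (v, x) else sb)
    (pvAt m 0 col, 0)
  (sb.2, col)

-- ===== PRECONDITION & SPEC =====
-- Exactly where Python A returns: m nonempty and col a valid Python index into every row.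
def Pre_smallest_in_the_column (m : List (List Int)) (col : Int) : Prop :=
  m ≠ [] ∧ ∀ row ∈ m, PySem.Raise.InRange row.length col
instance (m : List (List Int)) (col : Int) : Decidable (Pre_smallest_in_the_column m col) := by
  unfold Pre_smallest_in_the_column; infer_instance

def pvWitness_smallest_in_the_column : List (List Int) × Int := ([[3, 7], [1, 2], [1, 9]], 0)

def Spec_smallest_in_the_column (m : List (List Int)) (col : Int) (out : Int × Int) : Prop := out = smallest_in_the_column_alt m col
instance (m : List (List Int)) (col : Int) (out : Int × Int) : Decidable (Spec_smallest_in_the_column m col out) := by unfold Spec_smallest_in_the_column; infer_instance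

-- ===== CLAIM (what is proved, stated in full; the proofs are below) =====
def Claim_equal_smallest_in_the_column : Prop := ∀ (m : List (List Int)) (col : Int), Dom_smallest_in_the_column m col → Pre_smallest_in_the_column m col → Spec_smallest_in_the_column m col (smallest_in_the_column m col)

-- ===== LEMMAS AND PROOFS =====

-- Invariant of B's fold after processing indices 1..k-1 (k ≥ 1):
-- the state (s, b) has s = minimum of column entries 0..k-1, b the first index
-- attaining it, and s equals A's first fold over 0..k-1.
theorem pv_invariant (m : List (List Int)) (col : Int) :
    ∀ (j : Nat), (1 + (j : Int)) ≤ (m.length : Int) →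
    (let k : Int := 1 + (j : Int)
     let sb := (PySem.List.pyRange 1 k 1).foldl
       (fun (sb : Int × Int) x =>
         let v := pvAt m x col
         if v < sb.1 then (v, x) else sb)
       (pvAt m 0 col, 0)
     (∀ x : Int, 0 ≤ x → x < k → sb.1 ≤ pvAt m x col) ∧
     (0 ≤ sb.2 ∧ sb.2 < k ∧ pvAt m sb.2 col = sb.1) ∧
     (∀ x : Int, 0 ≤ x → x < sb.2 → pvAt m x col ≠ sb.1) ∧
     sb.1 = (PySem.List.pyRange 0 k 1).foldl
       (fun s x => if pvAt m x col < s then pvAt m x col else s) (pvAt m 0 col)) := by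
  intro j
  induction j with
  | zero =>
    intro _
    simp only [Nat.cast_zero, add_zero]
    rw [PySem.List.pyRange_one_eq_nil (by omega)]
    rw [show (PySem.List.pyRange 0 1 1) = [0] from by
      rw [show (1 : Int) = 0 + 1 from rfl]; exact PySem.List.pyRange_one_singleton 0]
    simp only [List.foldl_nil, List.foldl_cons]
    refine ⟨?_, ⟨by norm_num, by norm_num, by trivial⟩, by intro x hx hx'; omega, ?_⟩
    · intro x hx hx'
      have : x = 0 := by omega
      subst this; exact le_refl _
    · simp
  | succ i ih =>
    intro hlen
    have hk : (1 : Int) + i ≤ m.length := by push_cast at hlen ⊢; omega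
    obtain ⟨h1, ⟨hb0, hb1, hb2⟩, h3, h4⟩ := ih hk
    have hsplit : PySem.List.pyRange 1 (1 + ((i : Int) + 1)) 1
        = PySem.List.pyRange 1 (1 + (i : Int)) 1 ++ [1 + (i : Int)] := by
      rw [show (1 + ((i : Int) + 1)) = (1 + (i : Int)) + 1 from by ring]
      exact PySem.List.pyRange_one_succ_right (by omega)
    have hsplit0 : PySem.List.pyRange 0 (1 + ((i : Int) + 1)) 1
        = PySem.List.pyRange 0 (1 + (i : Int)) 1 ++ [1 + (i : Int)] := by
      rw [show (1 + ((i : Int) + 1)) = (1 + (i : Int)) + 1 from by ring]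
      exact PySem.List.pyRange_one_succ_right (by omega)
    simp only [Nat.cast_add, Nat.cast_one] at *
    rw [hsplit, hsplit0]
    simp only [List.foldl_append, List.foldl_cons, List.foldl_nil]
    set sb := (PySem.List.pyRange 1 (1 + (i : Int)) 1).foldl
       (fun (sb : Int × Int) x =>
         let v := pvAt m x col
         if v < sb.1 then (v, x) else sb)
       (pvAt m 0 col, 0) with hsb
    by_cases hlt : pvAt m (1 + (i : Int)) col < sb.1
    · simp only [hlt, if_pos]
      refine ⟨?_, ⟨by omega, by omega, by trivial⟩, ?_, ?_⟩
      · intro x hx hx'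
        by_cases hxk : x < 1 + (i : Int)
        · exact le_of_lt (lt_of_lt_of_le hlt (h1 x hx hxk))
        · have : x = 1 + (i : Int) := by omega
          subst this; exact le_refl _
      · intro x hx hx'
        have := h1 x hx hx'
        omega
      · rw [← h4]; simp [hlt]
    · simp only [hlt, if_false]
      refine ⟨?_, ⟨hb0, by omega, hb2⟩, h3, ?_⟩
      · intro x hx hx'
        by_cases hxk : x < 1 + (i : Int)
        · exact h1 x hx hxk
        · have : x = 1 + (i : Int) := by omega
          subst this; omega
      · rw [← h4]; simp [hlt]

-- A's second loop over indices a..n-1 returns the first index b ≥ a whose column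
-- entry equals s, given that b < n and entries in [a, b) differ from s.
theorem pv_findA_spec (m : List (List Int)) (col s : Int) :
    ∀ (d : Nat) (a b : Int), (b - a).toNat = d → 0 ≤ a → a ≤ b → b < (m.length : Int) →
    pvAt m b col = s → (∀ x : Int, a ≤ x → x < b → pvAt m x col ≠ s) →
    pvFindA m col s (PySem.List.pyRange a (m.length : Int) 1) = (b, col) := by
  intro d
  induction d with
  | zero =>
    intro a b hd ha hab hbn hbs _
    have hab' : a = b := by omega
    subst hab'
    rw [PySem.List.pyRange_one_cons (by omega)]
    simp [pvFindA, hbs]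
  | succ i ih =>
    intro a b hd ha hab hbn hbs hdiff
    have halt : a < b := by omega
    rw [PySem.List.pyRange_one_cons (by omega)]
    have hne : pvAt m a col ≠ s := hdiff a (le_refl a) halt
    simp only [pvFindA, beq_iff_eq, hne, if_false]
    exact ih (a + 1) b (by omega) (by omega) (by omega) hbn hbs
      (fun x hx hx' => hdiff x (by omega) hx')

-- ===== VERDICT (by name: the statement is the Claim_ definition above) =====
theorem smallest_in_the_column_spec : Claim_equal_smallest_in_the_column := by
  intro m col _ hpre
  obtain ⟨hne, _⟩ := hpre
  have hn : 1 ≤ (m.length : Int) := by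
    have : m.length ≠ 0 := fun h => hne (List.eq_nil_of_length_eq_zero h)
    omega
  have hinv := pv_invariant m col (m.length - 1)
    (by omega)
  rw [show (1 + ((m.length - 1 : Nat) : Int)) = (m.length : Int) from by omega] at hinv
  obtain ⟨h1, ⟨hb0, hb1, hb2⟩, h3, h4⟩ := hinv
  show smallest_in_the_column m col = smallest_in_the_column_alt m col
  unfold smallest_in_the_column smallest_in_the_column_alt
  simp only []
  rw [← h4]
  exact pv_findA_spec m col _ _ 0 _ rfl (le_refl 0) hb0 hb1 hb2
    (fun x hx hx' => h3 x hx hx')
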